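-- pv_equiv track=rewrite | github.com/krab11/code | python/problems/pattern_printing-1.py | solve
-- ===== SOURCE A (Python) =====
-- def solve(A):
--     res = []
--     for i in range(0, A):
--         twod = []
--         for j in range(0, A):
--             if j > i:
--                 twod.append(0)
--             else:
--                 twod.append(j + 1)
--         res.append(twod)
--     return res
-- ===== SOURCE B (Python) =====
-- def solve(A):
--     res = []
--     cur = [0] * A
--     for i in range(0, A):
--         cur[i] = i + 1
--         res.append(cur.copy())
--     return res
-- ===== Notes on version B (the rewrite author's own statement) =====
-- stated objective: simpler
-- what changed: Replaces the nested row-rebuilding loop (with the j>i branch) by a single loop that keeps one running row, updates only the one cell that changes per row, and snapshots it.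
import Mathlib
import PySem

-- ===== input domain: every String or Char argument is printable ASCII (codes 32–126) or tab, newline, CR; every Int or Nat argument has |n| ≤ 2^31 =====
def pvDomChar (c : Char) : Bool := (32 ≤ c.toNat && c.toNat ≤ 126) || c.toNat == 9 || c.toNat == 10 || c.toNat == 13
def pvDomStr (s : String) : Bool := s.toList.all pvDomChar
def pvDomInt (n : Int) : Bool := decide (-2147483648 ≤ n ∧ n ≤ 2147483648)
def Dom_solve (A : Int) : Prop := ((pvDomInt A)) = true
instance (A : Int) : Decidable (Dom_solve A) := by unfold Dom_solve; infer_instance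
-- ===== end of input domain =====

-- B keeps a single running row, updates the one changed cell per iteration and snapshots it,
-- instead of rebuilding each row with a nested loop and a branch (objective: simpler).

-- ===== PORT A =====
def solve (A : Int) : List (List Int) :=
  (PySem.List.pyRange 0 A 1).foldl
    (fun res i =>
      res ++ [(PySem.List.pyRange 0 A 1).foldl
        (fun twod j => twod ++ [if j > i then 0 else j + 1]) []])
    []

-- ===== PORT B =====
-- cur[i] = i+1 : index i is in range (0 ≤ i < A = len cur), so List.set is exact here
def solve_alt (A : Int) : List (List Int) :=
  ((PySem.List.pyRange 0 A 1).foldl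
    (fun (st : List Int × List (List Int)) i =>
      let cur := st.1.set i.toNat (i + 1)
      (cur, st.2 ++ [cur]))
    (List.replicate A.toNat 0, [])).2

-- ===== PRECONDITION & SPEC =====
def Spec_solve (A : Int) (out : List (List Int)) : Prop := out = solve_alt A
instance (A : Int) (out : List (List Int)) : Decidable (Spec_solve A out) := by unfold Spec_solve; infer_instance

-- ===== CLAIM (what is proved, stated in full; the proofs are below) =====
def Claim_equal_solve : Prop := ∀ (A : Int), Dom_solve A → Spec_solve A (solve A)

-- ===== LEMMAS AND PROOFS =====

-- row state of B after m iterations (length-n row, first m cells filled)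
def curAt (n m : ℕ) : List Int := (List.range n).map (fun j => if j < m then (j : Int) + 1 else 0)

theorem foldl_append_singleton {α β : Type} (f : α → β) (l : List α) (acc : List β) :
    l.foldl (fun res i => res ++ [f i]) acc = acc ++ l.map f := by
  induction l generalizing acc with
  | nil => simp
  | cons x xs ih => simp [List.foldl_cons, ih]

theorem curAt_zero (n : ℕ) : curAt n 0 = List.replicate n 0 := by
  apply List.ext_getElem <;> simp [curAt]

theorem curAt_set (n m : ℕ) (_h : m < n) :
    (curAt n m).set m ((m : Int) + 1) = curAt n (m + 1) := by
  apply List.ext_getElem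
  · simp [curAt]
  · intro k _ _
    simp only [curAt, List.getElem_set, List.getElem_map, List.getElem_range]
    split_ifs <;> omega

theorem solve_eq_map (A : Int) :
    solve A = (PySem.List.pyRange 0 A 1).map
      (fun i => (PySem.List.pyRange 0 A 1).map (fun j => if j > i then 0 else j + 1)) := by
  unfold solve
  rw [foldl_append_singleton (f := fun i => (PySem.List.pyRange 0 A 1).foldl
    (fun twod j => twod ++ [if j > i then 0 else j + 1]) [])]
  simp only [List.nil_append]
  apply List.map_congr_left
  intro i _
  rw [foldl_append_singleton]
  simp

theorem solve_alt_fold (n : ℕ) :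
    ∀ m : ℕ, m ≤ n →
      ((PySem.List.pyRange 0 (m : Int) 1).foldl
        (fun (st : List Int × List (List Int)) i =>
          let cur := st.1.set i.toNat (i + 1)
          (cur, st.2 ++ [cur]))
        (curAt n 0, []))
      = (curAt n m, (List.range m).map (fun i => curAt n (i + 1))) := by
  intro m
  induction m with
  | zero => intro _; simp [PySem.List.pyRange_one_eq_nil]
  | succ m ih =>
    intro hm
    have h1 : ((m : Int) + 1 : Int) = ((m + 1 : ℕ) : Int) := by push_cast; ring
    rw [← h1, PySem.List.pyRange_one_succ_right (by positivity), List.foldl_append,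
      ih (by omega)]
    simp only [List.foldl_cons, List.foldl_nil]
    have hset : (curAt n m).set m ((m : Int) + 1) = curAt n (m + 1) :=
      curAt_set n m (by omega)
    simp [Int.toNat_natCast, hset, List.range_succ]

theorem row_eq (n i : ℕ) :
    (List.range n).map ((fun j => if j > (i : Int) then 0 else j + 1) ∘ fun (k : ℕ) => (k : Int))
      = curAt n (i + 1) := by
  simp only [curAt]
  apply List.map_congr_left
  intro k _
  simp only [Function.comp_apply]
  split_ifs with h1 h2 h2
  · omega
  · omega
  · rfl
  · omega

-- ===== VERDICT (by name: the statement is the Claim_ definition above) =====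
theorem solve_spec : Claim_equal_solve := by
  intro A _
  unfold Spec_solve solve_alt
  by_cases hA : A ≤ 0
  · rw [solve_eq_map, PySem.List.pyRange_one_eq_nil hA]
    simp
  · rw [not_le] at hA
    have hAn : A = (A.toNat : Int) := (Int.toNat_of_nonneg (le_of_lt hA)).symm
    rw [solve_eq_map, hAn, ← curAt_zero]
    simp only [Int.toNat_natCast]
    rw [solve_alt_fold A.toNat A.toNat le_rfl, PySem.List.pyRange_one]
    simp only [Int.sub_zero, Int.toNat_natCast, List.map_map]
    apply List.map_congr_left
    intro i _
    simp only [Function.comp_apply, Int.zero_add]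
    exact row_eq A.toNat i
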